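-- pv_equiv track=rewrite | github.com/JOHNNY-fans/Travel-on-the-ICD-Tree | code/retrieval/retrieval&rerank_tools.py | merge_round_robin_advanced
-- ===== SOURCE A (Python) =====
-- def merge_round_robin_advanced(sub_lists):
--     """
--     合并策略：
--       第 i 轮：
--         - 依次取 sub_lists 中每一个子列表的第 i 项（如果存在）
--     """
--     merged = []
--
--     # 如果 sub_lists 为空，直接返回空列表
--     if not sub_lists:
--         return merged
--
--     # 计算最大轮次（即最长子列表的长度）
--     max_round = max(len(sub) for sub in sub_lists)
--
--     for i in range(max_round):
--         # 遍历 sub_lists 中的每一个子列表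
--         for sub in sub_lists:
--             if i < len(sub):
--                 merged.append(sub[i])
--
--     return merged
-- ===== SOURCE B (Python) =====
-- def merge_round_robin_advanced(sub_lists):
--     merged = []
--     active = [s for s in sub_lists if s]
--     i = 0
--     while active:
--         for s in active:
--             merged.append(s[i])
--         i += 1
--         active = [s for s in active if i < len(s)]
--     return merged
-- ===== Notes on version B (the rewrite author's own statement) =====
-- stated objective: alternative
-- what changed: Instead of scanning every sublist on every round with an index bound check, B keeps a list of still-active sublists and drops exhausted ones after each round, so exhausted lists are never rescanned.
import Mathlib
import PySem

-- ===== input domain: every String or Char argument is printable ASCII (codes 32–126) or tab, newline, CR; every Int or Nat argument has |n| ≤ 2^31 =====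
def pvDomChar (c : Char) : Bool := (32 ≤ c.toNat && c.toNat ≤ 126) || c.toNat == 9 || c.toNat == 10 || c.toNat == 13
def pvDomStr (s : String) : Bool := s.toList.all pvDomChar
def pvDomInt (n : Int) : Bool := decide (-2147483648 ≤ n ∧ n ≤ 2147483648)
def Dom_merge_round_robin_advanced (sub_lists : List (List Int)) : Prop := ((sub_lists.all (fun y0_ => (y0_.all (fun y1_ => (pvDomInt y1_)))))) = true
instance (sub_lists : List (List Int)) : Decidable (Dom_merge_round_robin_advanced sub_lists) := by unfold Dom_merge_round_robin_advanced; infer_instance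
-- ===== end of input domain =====

-- B keeps a shrinking list of still-active sublists instead of rescanning every sublist each round; return value proved identical to A's.

-- ===== PORT A =====
-- `max(len(sub) for sub in sub_lists)` on the (guarded) nonempty list: lengths are ≥ 0,
-- so the fold of `max` with base 0 over the nonempty list is exactly Python's max here.
def merge_round_robin_advanced (sub_lists : List (List Int)) : List Int :=
  if sub_lists = [] then []
  else
    let max_round : Nat := (sub_lists.map (fun sub => sub.length)).foldr max 0
    (List.range max_round).foldl (fun merged i =>
      sub_lists.foldl (fun merged sub =>
        -- `sub[i]` guarded by `i < len(sub)`, so `getD` is exact here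
        if i < sub.length then merged ++ [sub.getD i 0] else merged) merged) []

-- ===== PORT B =====
-- the while loop of Source B; `fuel` is only a totality guard (any fuel > number of rounds suffices)
def rrLoop (fuel : Nat) (active : List (List Int)) (i : Nat) (merged : List Int) : List Int :=
  match fuel with
  | 0 => merged
  | fuel + 1 =>
    if active = [] then merged
    else
      rrLoop fuel (active.filter (fun s => decide (i + 1 < s.length))) (i + 1)
        (merged ++ active.map (fun s => s.getD i 0))

def merge_round_robin_advanced_alt (sub_lists : List (List Int)) : List Int :=
  rrLoop ((sub_lists.map (fun s => s.length)).sum + 1)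
    (sub_lists.filter (fun s => decide (s ≠ []))) 0 []

-- ===== PRECONDITION & SPEC =====
def Spec_merge_round_robin_advanced (sub_lists : List (List Int)) (out : List Int) : Prop := out = merge_round_robin_advanced_alt sub_lists
instance (sub_lists : List (List Int)) (out : List Int) : Decidable (Spec_merge_round_robin_advanced sub_lists out) := by unfold Spec_merge_round_robin_advanced; infer_instance

-- ===== CLAIM (what is proved, stated in full; the proofs are below) =====
def Claim_equal_merge_round_robin_advanced : Prop := ∀ (sub_lists : List (List Int)), Dom_merge_round_robin_advanced sub_lists → Spec_merge_round_robin_advanced sub_lists (merge_round_robin_advanced sub_lists)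

-- ===== LEMMAS AND PROOFS =====

-- column i of a family of lists: the i-th element of every list long enough, in order
def rrCol (L : List (List Int)) (i : Nat) : List Int :=
  L.filterMap (fun s => s[i]?)

-- the guarded-append inner pass is column extraction
theorem rrCol_eq_filter_map (L : List (List Int)) (i : Nat) :
    (L.filter (fun s => decide (i < s.length))).map (fun s => s.getD i 0) = rrCol L i := by
  induction L with
  | nil => rfl
  | cons s t ih =>
    simp only [rrCol] at ih ⊢
    simp only [List.getD_eq_getElem?_getD] at ih
    by_cases h : i < s.length
    · have hs : s[i]? = some s[i] := List.getElem?_eq_getElem h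
      simp [List.filter_cons, List.filterMap_cons, h, hs, ih]
    · have hs : s[i]? = none := List.getElem?_eq_none (by omega)
      simp [List.filter_cons, List.filterMap_cons, h, hs, ih]

-- filtering out lists of length ≤ j does not change any column i ≥ j
theorem rrCol_filter (L : List (List Int)) (j i : Nat) (hij : j ≤ i) :
    rrCol (L.filter (fun s => decide (j < s.length))) i = rrCol L i := by
  induction L with
  | nil => rfl
  | cons s t ih =>
    by_cases h : j < s.length
    · simp [rrCol, List.filterMap_cons, h] at ih ⊢; rw [ih]
    · have hnone : s[i]? = none := by
        apply List.getElem?_eq_none; omega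
      simp [rrCol, List.filterMap_cons, h, hnone] at ih ⊢; exact ih

-- columns at or beyond every length are empty
theorem rrCol_eq_nil (L : List (List Int)) (i : Nat) (h : ∀ s ∈ L, s.length ≤ i) :
    rrCol L i = [] := by
  induction L with
  | nil => rfl
  | cons s t ih =>
    have hnone : s[i]? = none := List.getElem?_eq_none (h s (by simp))
    have ht : rrCol t i = [] := ih (fun x hx => h x (by simp [hx]))
    simp only [rrCol, List.filterMap_cons, hnone] at ht ⊢
    exact ht

-- B's loop produces the concatenation of columns i, i+1, …
theorem rrLoop_eq (fuel : Nat) :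
    ∀ (L : List (List Int)) (i : Nat) (merged : List Int),
    (∀ s ∈ L, i < s.length) → (∀ s ∈ L, s.length ≤ i + fuel) →
    rrLoop fuel L i merged = merged ++ (List.range fuel).flatMap (fun k => rrCol L (i + k)) := by
  induction fuel with
  | zero =>
    intro L i merged hlo hhi
    simp [rrLoop]
  | succ fuel ih =>
    intro L i merged hlo hhi
    by_cases hL : L = []
    · subst hL
      simp [rrLoop, rrCol]
    · rw [rrLoop]
      simp only [hL, if_false]
      rw [ih (L.filter (fun s => decide (i + 1 < s.length))) (i + 1)
            (merged ++ L.map (fun s => s.getD i 0))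
            (by intro s hs; simp at hs; exact hs.2)
            (by intro s hs; simp at hs; have := hhi s hs.1; omega)]
      rw [List.range_succ_eq_map, List.flatMap_cons, List.flatMap_map]
      have hmap : L.map (fun s => s.getD i 0) = rrCol L i := by
        rw [← rrCol_eq_filter_map]
        congr 1
        rw [List.filter_eq_self.mpr]
        intro s hs; simpa using hlo s hs
      have hcols : ∀ k, rrCol (L.filter (fun s => decide (i + 1 < s.length))) (i + 1 + k)
          = rrCol L (i + 1 + k) := fun k => rrCol_filter L (i + 1) (i + 1 + k) (by omega)
      simp only [Function.comp, hcols, hmap, List.append_assoc, Nat.add_zero]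
      congr 2
      apply List.flatMap_congr
      intro k hk
      congr 1
      omega

-- truncating the round count at any n covering every length changes nothing
theorem flatMap_range_trunc (L : List (List Int)) (M : Nat)
    (hM : ∀ s ∈ L, s.length ≤ M) :
    ∀ n, M ≤ n → (List.range n).flatMap (fun k => rrCol L k) = (List.range M).flatMap (fun k => rrCol L k) := by
  intro n hn
  induction n with
  | zero => have : M = 0 := by omega
            simp [this]
  | succ n ihn =>
    by_cases h : M = n + 1
    · simp [h]
    · have hMn : M ≤ n := by omega
      rw [List.range_succ, List.flatMap_append, ihn hMn]
      simp [rrCol_eq_nil L n (fun s hs => le_trans (hM s hs) hMn)]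

-- A's nested folds are the concatenation of columns 0 … max_round-1
theorem portA_eq_flatMap (sub_lists : List (List Int)) (n : Nat) :
    (List.range n).foldl (fun merged i =>
      sub_lists.foldl (fun merged sub =>
        if i < sub.length then merged ++ [sub.getD i 0] else merged) merged) []
    = (List.range n).flatMap (fun k => rrCol sub_lists k) := by
  have hinner : ∀ (m : List Int) (i : Nat),
      sub_lists.foldl (fun merged sub =>
        if i < sub.length then merged ++ [sub.getD i 0] else merged) m
      = m ++ rrCol sub_lists i := by
    intro m i
    rw [← rrCol_eq_filter_map]
    induction sub_lists generalizing m with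
    | nil => simp
    | cons s t ih =>
      by_cases h : i < s.length
      · rw [List.foldl_cons, if_pos h, ih, List.filter_cons]
        simp only [h, decide_true, if_true, List.map_cons, List.append_assoc,
          List.cons_append, List.nil_append]
      · rw [List.foldl_cons, if_neg h, ih, List.filter_cons]
        simp only [h, decide_false, Bool.false_eq_true, if_false]
  induction n with
  | zero => simp
  | succ n ihn =>
    rw [List.range_succ, List.foldl_append, List.flatMap_append, ihn]
    simp only [List.foldl_cons, List.foldl_nil, List.flatMap_cons, List.flatMap_nil,
      List.append_nil]
    exact hinner _ n

theorem max_len_bound (sub_lists : List (List Int)) :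
    ∀ s ∈ sub_lists, s.length ≤ (sub_lists.map (fun sub => sub.length)).foldr max 0 := by
  induction sub_lists with
  | nil => simp
  | cons a t ih =>
    intro s hs
    simp only [List.map_cons, List.foldr_cons]
    rcases List.mem_cons.mp hs with h | h
    · subst h; omega
    · have := ih s h; omega

theorem max_le_sum (sub_lists : List (List Int)) :
    (sub_lists.map (fun sub => sub.length)).foldr max 0
      ≤ (sub_lists.map (fun s => s.length)).sum + 1 := by
  induction sub_lists with
  | nil => simp
  | cons a t ih =>
    simp only [List.map_cons, List.foldr_cons, List.sum_cons]
    omega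

theorem sum_len_bound (sub_lists : List (List Int)) :
    ∀ s ∈ sub_lists, s.length ≤ (sub_lists.map (fun sub => sub.length)).sum := by
  induction sub_lists with
  | nil => simp
  | cons a t ih =>
    intro s hs
    simp only [List.map_cons, List.sum_cons]
    rcases List.mem_cons.mp hs with h | h
    · subst h; omega
    · have := ih s h; omega

-- ===== VERDICT (by name: the statement is the Claim_ definition above) =====
theorem merge_round_robin_advanced_spec : Claim_equal_merge_round_robin_advanced := by
  intro sub_lists _
  unfold Spec_merge_round_robin_advanced merge_round_robin_advanced merge_round_robin_advanced_alt
  set L0 := sub_lists.filter (fun s => decide (s ≠ [])) with hL0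
  have hlo : ∀ s ∈ L0, 0 < s.length := by
    intro s hs; rw [hL0] at hs; simp at hs
    cases s with
    | nil => exact absurd rfl hs.2
    | cons a t => simp
  have hhi : ∀ s ∈ L0, s.length ≤ 0 + ((sub_lists.map (fun s => s.length)).sum + 1) := by
    intro s hs; rw [hL0] at hs
    have := sum_len_bound sub_lists s (List.mem_of_mem_filter hs)
    omega
  rw [rrLoop_eq _ L0 0 [] hlo hhi]
  have hcol0 : ∀ k, rrCol L0 k = rrCol sub_lists k := by
    intro k
    have := rrCol_filter sub_lists 0 k (Nat.zero_le k)
    rw [hL0]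
    rw [← this]
    congr 1
    apply List.filter_congr
    intro s hs
    cases s <;> simp
  simp only [Nat.zero_add, hcol0, List.nil_append]
  by_cases hnil : sub_lists = []
  · subst hnil
    simp [rrCol]
  · simp only [hnil, if_false]
    rw [portA_eq_flatMap]
    exact (flatMap_range_trunc sub_lists _ (max_len_bound sub_lists) _
      (max_le_sum sub_lists)).symm
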